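-- pv_equiv track=rewrite | github.com/musfarmuhamed/NVIDIA-SOLO | tutorial_notebook/LABS_Quantum_GPU.py | energy_function
-- ===== SOURCE A (Python) =====
-- def energy_function(bitstring):
--     """LABS Energy: Sum of squared autocorrelations (excluding peak at 0)."""
--     # Convert '0'/'1' string to -1/+1 spins
--     spin_s = [1 if bit == '1' else -1 for bit in bitstring]
--     # Note: cudaq usually returns '10...' strings.
--     # Standard mapping 1->-1, 0->1 or vice versa doesn't change Energy magnitude
--     # but let's stick to standard: 0 -> 1, 1 -> -1 (or similar)
--
--     N = len(spin_s)
--     energy = 0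
--     for k in range(1, N):
--         c_k = 0
--         for i in range(N - k):
--             c_k += spin_s[i] * spin_s[i+k]
--         energy += c_k**2
--     return energy
-- ===== SOURCE B (Python) =====
-- def energy_function(bitstring):
--     """LABS Energy: Sum of squared autocorrelations (excluding peak at 0).
--
--     Streaming formulation: sweep the string left to right; when position j
--     arrives it extends every lag-k correlation by the single pair (j-k, j),
--     and the total energy is updated online by the square-difference of the
--     one table entry that changed.  No per-lag rescan and no final squaring
--     pass; pair products are boolean equality tests instead of spin products.
--     """
--     ones = [ch == '1' for ch in bitstring]
--     c = []        # c[k-1] = autocorrelation at lag k over the prefix seen so far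
--     energy = 0    # sum of squares of c, maintained incrementally
--     for j in range(1, len(ones)):
--         c.append(0)
--         for k in range(1, j + 1):
--             d = 1 if ones[j - k] == ones[j] else -1
--             v = c[k - 1] + d
--             energy += v * v - c[k - 1] * c[k - 1]
--             c[k - 1] = v
--     return energy
-- ===== Notes on version B (the rewrite author's own statement) =====
-- stated objective: alternative
-- what changed: B is a streaming algorithm: it sweeps the string once left to right, extending each lag's correlation by the single new pair ending at the current position and updating the total energy online via the square-difference of the one changed table entry, using boolean equality of bits instead of spin products; A instead rescans the whole sequence once per lag and squares each lag's sum at the end.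
import Mathlib
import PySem

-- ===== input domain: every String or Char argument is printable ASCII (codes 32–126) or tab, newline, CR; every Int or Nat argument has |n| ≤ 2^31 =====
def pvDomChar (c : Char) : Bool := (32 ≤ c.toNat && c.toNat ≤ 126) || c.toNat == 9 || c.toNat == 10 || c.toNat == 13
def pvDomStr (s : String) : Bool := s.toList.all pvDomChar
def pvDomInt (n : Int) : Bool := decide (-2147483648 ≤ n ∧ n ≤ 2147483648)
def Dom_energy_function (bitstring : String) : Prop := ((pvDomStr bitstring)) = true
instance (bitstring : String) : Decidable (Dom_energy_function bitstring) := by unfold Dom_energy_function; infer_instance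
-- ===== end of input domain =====

-- B replaces A's per-lag rescans by a single left-to-right streaming sweep that extends each
-- lag's correlation by the new pair ending at the current position and updates the energy
-- online via the square-difference of the changed entry (alternative decomposition, same cost).


-- ===== PORT A =====
-- for k in range(1, N): rescan the spins to get c_k, add c_k**2
def energy_function (bitstring : String) : Int :=
  let spin_s : List Int := bitstring.toList.map (fun bit => if bit = '1' then 1 else -1)
  let N : Int := spin_s.length
  (PySem.List.pyRange 1 N 1).foldl
    (fun energy k =>
      let c_k : Int := (PySem.List.pyRange 0 (N - k) 1).foldl
        (fun c i => c + PySem.List.pyGetD spin_s i 0 * PySem.List.pyGetD spin_s (i + k) 0) 0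
      energy + c_k ^ 2) 0

-- ===== PORT B =====
-- streaming sweep over positions j; state = (lag table c, running energy)
def energy_function_alt (bitstring : String) : Int :=
  let ones : List Bool := bitstring.toList.map (fun ch => ch = '1')
  let res : List Int × Int := (PySem.List.pyRange 1 (ones.length : Int) 1).foldl
    (fun st j =>
      let c := st.1 ++ [0]
      (PySem.List.pyRange 1 (j + 1) 1).foldl
        (fun (st : List Int × Int) k =>
          let d : Int := if PySem.List.pyGetD ones (j - k) false = PySem.List.pyGetD ones j false
            then 1 else -1
          let v : Int := PySem.List.pyGetD st.1 (k - 1) 0 + d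
          (PySem.List.pySetD st.1 (k - 1) v,
           st.2 + v * v - PySem.List.pyGetD st.1 (k - 1) 0 * PySem.List.pyGetD st.1 (k - 1) 0))
        (c, st.2))
    ([], 0)
  res.2

-- ===== PRECONDITION & SPEC =====
def Spec_energy_function (bitstring : String) (out : Int) : Prop := out = energy_function_alt bitstring
instance (bitstring : String) (out : Int) : Decidable (Spec_energy_function bitstring out) := by unfold Spec_energy_function; infer_instance

-- ===== CLAIM (what is proved, stated in full; the proofs are below) =====
def Claim_equal_energy_function : Prop := ∀ (bitstring : String), Dom_energy_function bitstring → Spec_energy_function bitstring (energy_function bitstring)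

-- ===== LEMMAS AND PROOFS =====

def pvG (s : List Int) (i j : Nat) : Int := s.getD i 0 * s.getD j 0

-- autocorrelation at lag k of the length-p prefix
def pvCorrU (s : List Int) (p k : Nat) : Int :=
  ((List.range (p - k)).map (fun i => pvG s i (i + k))).sum

theorem pv_A (s : List Int) :
    (PySem.List.pyRange 1 (s.length : Int) 1).foldl
      (fun energy k => energy +
        ((PySem.List.pyRange 0 ((s.length : Int) - k) 1).foldl
          (fun c i => c + PySem.List.pyGetD s i 0 * PySem.List.pyGetD s (i + k) 0) 0) ^ 2) 0
    = ((List.range (s.length - 1)).map (fun t => pvCorrU s s.length (t + 1) ^ 2)).sum := by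
  rw [PySem.List.pyRange_one 1 (s.length : Int), List.foldl_map]
  have hn : ((s.length : Int) - 1).toNat = s.length - 1 := by omega
  rw [hn, PySem.List.foldl_add (List.range (s.length - 1))
    (fun t => ((PySem.List.pyRange 0 ((s.length : Int) - (1 + (t : Int))) 1).foldl
      (fun c i => c + PySem.List.pyGetD s i 0 * PySem.List.pyGetD s (i + (1 + (t : Int))) 0) 0) ^ 2) 0,
    zero_add]
  congr 1
  refine List.map_congr_left (fun t ht => ?_)
  have htlt : t < s.length - 1 := List.mem_range.mp ht
  congr 1
  have hk : (s.length : Int) - (1 + (t : Int)) = ((s.length - (t + 1) : Nat) : Int) := by omega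
  rw [hk, PySem.List.pyRange_zero_nat, List.foldl_map,
    PySem.List.foldl_add (List.range (s.length - (t + 1)))
      (fun i : Nat => PySem.List.pyGetD s ((i : Nat) : Int) 0
        * PySem.List.pyGetD s (((i : Nat) : Int) + (1 + (t : Int))) 0) 0,
    zero_add, pvCorrU]
  congr 1
  refine List.map_congr_left (fun i _ => ?_)
  have hcast : ((i : Nat) : Int) + (1 + (t : Int)) = (((i + (t + 1) : Nat)) : Int) := by
    push_cast; ring
  rw [hcast, PySem.List.pyGetD_natCast, PySem.List.pyGetD_natCast, pvG]

-- sum of squares over range n with one entry changed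
theorem pv_sum_update (g g' : Nat → Int) (u : Nat) (h : ∀ t, t ≠ u → g' t = g t) :
    ∀ n : Nat, u < n →
      ((List.range n).map g').sum = ((List.range n).map g).sum - g u + g' u := by
  intro n
  induction n with
  | zero => omega
  | succ n ihn =>
    intro hu
    rw [List.range_succ, List.map_append, List.map_append, List.sum_append, List.sum_append]
    by_cases hn : u = n
    · subst hn
      have : ((List.range u).map g').sum = ((List.range u).map g).sum := by
        congr 1
        exact List.map_congr_left (fun t ht => h t (by have := List.mem_range.mp ht; omega))
      rw [this]; simp only [List.map_cons, List.map_nil, List.sum_cons, List.sum_nil]; ring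
    · rw [ihn (by omega)]
      simp only [List.map_cons, List.map_nil, List.sum_cons, List.sum_nil,
        h n (fun he => hn he.symm)]
      ring


theorem pv_getD_map (ones : List Bool) (i : Nat) (hi : i < ones.length) :
    (ones.map (fun b => if b then (1 : Int) else -1)).getD i 0
      = if ones.getD i false then 1 else -1 := by
  rw [List.getD_eq_getElem _ _ (by simpa using hi), List.getD_eq_getElem _ _ hi,
    List.getElem_map]

theorem pv_d_eq (ones : List Bool) (s : List Int)
    (hmap : s = ones.map (fun b => if b then (1 : Int) else -1))
    (i j : Nat) (hi : i < ones.length) (hj : j < ones.length) :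
    (if ones.getD i false = ones.getD j false then (1 : Int) else -1) = pvG s i j := by
  subst hmap
  rw [pvG, pv_getD_map _ _ hi, pv_getD_map _ _ hj]
  cases h1 : ones.getD i false <;> cases h2 : ones.getD j false <;> simp

theorem pvCorrU_zero (s : List Int) (p k : Nat) (h : p ≤ k) : pvCorrU s p k = 0 := by
  rw [pvCorrU, Nat.sub_eq_zero_of_le h]; simp

theorem pvCorrU_succ (s : List Int) (j a : Nat) (haj : a ≤ j) :
    pvCorrU s (j + 1) a = pvCorrU s j a + pvG s (j - a) j := by
  rw [pvCorrU, pvCorrU]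
  have h1 : j + 1 - a = (j - a) + 1 := by omega
  have h2 : j - a + a = j := by omega
  rw [h1, List.range_succ, List.map_append, List.sum_append]
  simp only [List.map_cons, List.map_nil, List.sum_cons, List.sum_nil, add_zero, h2]

theorem pv_getD_snoc (c : List Int) (t : Nat) : (c ++ [0]).getD t 0 = c.getD t 0 := by
  by_cases h : t < c.length
  · rw [List.getD_eq_getElem _ _ (by simp; omega), List.getD_eq_getElem _ _ h,
      List.getElem_append_left h]
  · by_cases h2 : t = c.length
    · subst h2
      rw [List.getD_eq_getElem _ _ (by simp), List.getD_eq_default _ _ (by omega)]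
      simp
    · rw [List.getD_eq_default _ _ (by simp; omega), List.getD_eq_default _ _ (by omega)]

theorem pv_innerB (s : List Int) (ones : List Bool)
    (hmap : s = ones.map (fun b => if b then (1 : Int) else -1))
    (j : Nat) (hj : j < ones.length) (fuel : Nat) :
    ∀ (a : Nat) (c : List Int) (energy : Int), 1 ≤ a → j + 1 - a ≤ fuel → c.length = j →
      (∀ t, c.getD t 0 = if t + 1 < a then pvCorrU s (j + 1) (t + 1) else pvCorrU s j (t + 1)) →
      energy = ((List.range j).map (fun t => (c.getD t 0) ^ 2)).sum →
      let r := (PySem.List.pyRange (a : Int) ((j : Int) + 1) 1).foldl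
        (fun (st : List Int × Int) k =>
          let d : Int := if PySem.List.pyGetD ones ((j : Int) - k) false
              = PySem.List.pyGetD ones (j : Int) false then 1 else -1
          let v : Int := PySem.List.pyGetD st.1 (k - 1) 0 + d
          (PySem.List.pySetD st.1 (k - 1) v,
           st.2 + v * v - PySem.List.pyGetD st.1 (k - 1) 0 * PySem.List.pyGetD st.1 (k - 1) 0))
        (c, energy)
      r.1.length = j ∧ (∀ t, r.1.getD t 0 = pvCorrU s (j + 1) (t + 1))
        ∧ r.2 = ((List.range j).map (fun t => (r.1.getD t 0) ^ 2)).sum := by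
  induction fuel with
  | zero =>
    intro a c energy ha hfuel hc hget hen
    rw [PySem.List.pyRange_one_eq_nil (by omega)]
    simp only [List.foldl_nil]
    refine ⟨hc, fun t => ?_, hen⟩
    rw [hget t]
    by_cases h : t + 1 < a
    · rw [if_pos h]
    · rw [if_neg h, pvCorrU_zero s j (t + 1) (by omega), pvCorrU_zero s (j + 1) (t + 1) (by omega)]
  | succ fuel ih =>
    intro a c energy ha hfuel hc hget hen
    by_cases hend : j + 1 ≤ a
    · rw [PySem.List.pyRange_one_eq_nil (by omega)]
      simp only [List.foldl_nil]
      refine ⟨hc, fun t => ?_, hen⟩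
      rw [hget t]
      by_cases h : t + 1 < a
      · rw [if_pos h]
      · rw [if_neg h, pvCorrU_zero s j (t + 1) (by omega),
          pvCorrU_zero s (j + 1) (t + 1) (by omega)]
    · -- a ≤ j : one more iteration, at lag k = a
      rw [PySem.List.pyRange_one_cons (by omega), List.foldl_cons]
      have hu : a - 1 < c.length := by omega
      have hcast1 : (a : Int) - 1 = (((a - 1 : Nat)) : Int) := by omega
      have hcast2 : (j : Int) - (a : Int) = (((j - a : Nat)) : Int) := by omega
      have hd : (if PySem.List.pyGetD ones ((j : Int) - (a : Int)) false
            = PySem.List.pyGetD ones (j : Int) false then (1 : Int) else -1)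
          = pvG s (j - a) j := by
        rw [hcast2, PySem.List.pyGetD_natCast, PySem.List.pyGetD_natCast]
        exact pv_d_eq ones s hmap (j - a) j (by omega) hj
      have hold : c.getD (a - 1) 0 = pvCorrU s j a := by
        rw [hget (a - 1), if_neg (by omega)]
        congr 1
        omega
      -- the updated state
      set v : Int := c.getD (a - 1) 0 + pvG s (j - a) j with hv
      have hstate : (let d : Int := if PySem.List.pyGetD ones ((j : Int) - (a : Int)) false
              = PySem.List.pyGetD ones ((j : Int)) false then 1 else -1
          let v2 : Int := PySem.List.pyGetD (c, energy).1 ((a : Int) - 1) 0 + d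
          (PySem.List.pySetD (c, energy).1 ((a : Int) - 1) v2,
            (c, energy).2 + v2 * v2 -
              PySem.List.pyGetD (c, energy).1 ((a : Int) - 1) 0
                * PySem.List.pyGetD (c, energy).1 ((a : Int) - 1) 0))
          = (PySem.List.pySetD c (((a - 1 : Nat)) : Int) v,
             energy + v * v - c.getD (a - 1) 0 * c.getD (a - 1) 0) := by
        simp only [hcast1, PySem.List.pyGetD_natCast] at hd ⊢
        rw [hd]
      rw [hstate]
      have hvnew : v = pvCorrU s (j + 1) a := by
        rw [hv, hold, pvCorrU_succ s j a (by omega)]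
      have hset := fun (t : Nat) => PySem.List.pyGetD_pySetD_natCast c (a - 1) t v 0 hu
      have hc2len : (PySem.List.pySetD c (((a - 1 : Nat)) : Int) v).length = j := by
        rw [PySem.List.length_pySetD]; exact hc
      have hc2get : ∀ t : Nat, (PySem.List.pySetD c (((a - 1 : Nat)) : Int) v).getD t 0
          = if t + 1 < a + 1 then pvCorrU s (j + 1) (t + 1) else pvCorrU s j (t + 1) := by
        intro t
        have h := hset t
        simp only [PySem.List.pyGetD_natCast] at h
        rw [h]
        by_cases h1 : t = a - 1
        · rw [if_pos h1, if_pos (by omega), h1, hvnew]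
          congr 1
          omega
        · rw [if_neg h1, hget t]
          by_cases h2 : t + 1 < a
          · rw [if_pos h2, if_pos (by omega)]
          · rw [if_neg h2, if_neg (by omega)]
      have hen2 : energy + v * v - c.getD (a - 1) 0 * c.getD (a - 1) 0
          = ((List.range j).map
              (fun t => ((PySem.List.pySetD c (((a - 1 : Nat)) : Int) v).getD t 0) ^ 2)).sum := by
        have hupd := pv_sum_update (fun t => (c.getD t 0) ^ 2)
          (fun t => ((PySem.List.pySetD c (((a - 1 : Nat)) : Int) v).getD t 0) ^ 2)
          (a - 1)
          (fun t ht => by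
            have h := hset t
            simp only [PySem.List.pyGetD_natCast] at h
            show ((PySem.List.pySetD c (((a - 1 : Nat)) : Int) v).getD t 0) ^ 2
              = (c.getD t 0) ^ 2
            rw [h, if_neg ht])
          j (by omega)
        rw [hupd]
        beta_reduce
        have h := hset (a - 1)
        simp only [PySem.List.pyGetD_natCast] at h
        rw [h]
        simp only [if_true]
        rw [hen]
        ring
      have hres := ih (a + 1) (PySem.List.pySetD c (((a - 1 : Nat)) : Int) v)
        (energy + v * v - c.getD (a - 1) 0 * c.getD (a - 1) 0)
        (by omega) (by omega) hc2len hc2get hen2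
      have hcast3 : ((a : Int) + 1) = (((a + 1 : Nat)) : Int) := by push_cast; ring
      rw [hcast3]
      exact hres

theorem pv_outerB (s : List Int) (ones : List Bool)
    (hmap : s = ones.map (fun b => if b then (1 : Int) else -1)) (fuel : Nat) :
    ∀ (m : Nat) (c : List Int) (energy : Int), 1 ≤ m → m - 1 ≤ ones.length - 1 →
      ones.length - m ≤ fuel → c.length = m - 1 →
      (∀ t, c.getD t 0 = pvCorrU s m (t + 1)) →
      energy = ((List.range (m - 1)).map (fun t => (c.getD t 0) ^ 2)).sum →
      ((PySem.List.pyRange (m : Int) (ones.length : Int) 1).foldl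
        (fun st j =>
          let c := st.1 ++ [0]
          (PySem.List.pyRange 1 (j + 1) 1).foldl
            (fun (st : List Int × Int) k =>
              let d : Int := if PySem.List.pyGetD ones (j - k) false
                  = PySem.List.pyGetD ones j false then 1 else -1
              let v : Int := PySem.List.pyGetD st.1 (k - 1) 0 + d
              (PySem.List.pySetD st.1 (k - 1) v,
               st.2 + v * v - PySem.List.pyGetD st.1 (k - 1) 0 * PySem.List.pyGetD st.1 (k - 1) 0))
            (c, st.2))
        (c, energy)).2
      = ((List.range (ones.length - 1)).map
          (fun t => pvCorrU s ones.length (t + 1) ^ 2)).sum := by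
  induction fuel with
  | zero =>
    intro m c energy hm hmn hfuel hc hget hen
    rw [PySem.List.pyRange_one_eq_nil (by omega)]
    simp only [List.foldl_nil]
    have hmeq : m - 1 = ones.length - 1 := by omega
    rw [hen]
    by_cases hn0 : ones.length = 0
    · rw [hmeq, hn0]; simp
    · have hm2 : m = ones.length := by omega
      subst hm2
      congr 1
      exact List.map_congr_left (fun t _ => by rw [hget t])
  | succ fuel ih =>
    intro m c energy hm hmn hfuel hc hget hen
    by_cases hend : ones.length ≤ m
    · rw [PySem.List.pyRange_one_eq_nil (by omega)]
      simp only [List.foldl_nil]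
      have hmeq : m - 1 = ones.length - 1 := by omega
      rw [hen]
      by_cases hn0 : ones.length = 0
      · rw [hmeq, hn0]; simp
      · have hm2 : m = ones.length := by omega
        subst hm2
        congr 1
        exact List.map_congr_left (fun t _ => by rw [hget t])
    · -- m < length: one streaming step at position j = m
      rw [PySem.List.pyRange_one_cons (by omega), List.foldl_cons]
      have hgets : ∀ t : Nat, (c ++ [0]).getD t 0 = pvCorrU s m (t + 1) := by
        intro t
        rw [pv_getD_snoc, hget t]
      have hlens : (c ++ [0]).length = m := by
        rw [List.length_append, hc]
        simp
        omega
      have hens : energy = ((List.range m).map (fun t => ((c ++ [0]).getD t 0) ^ 2)).sum := by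
        have hmsucc : m = (m - 1) + 1 := by omega
        rw [hmsucc, List.range_succ, List.map_append, List.sum_append]
        have hlast : (c ++ [0]).getD (m - 1) 0 = 0 := by
          rw [hgets (m - 1), pvCorrU_zero s m (m - 1 + 1) (by omega)]
        simp only [List.map_cons, List.map_nil, List.sum_cons, List.sum_nil, hlast]
        rw [hen]
        have : ((List.range (m - 1)).map (fun t => ((c ++ [0]).getD t 0) ^ 2)).sum
            = ((List.range (m - 1)).map (fun t => (c.getD t 0) ^ 2)).sum := by
          congr 1
          exact List.map_congr_left (fun t _ => by rw [pv_getD_snoc])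
        rw [this]
        ring
      have hinner := pv_innerB s ones hmap m (by omega) m 1 (c ++ [0]) energy
        (by omega) (by omega) hlens
        (fun t => by rw [if_neg (by omega)]; exact hgets t) hens
      simp only [Nat.cast_one] at hinner
      obtain ⟨hr1, hr2, hr3⟩ := hinner
      set R : List Int × Int := List.foldl
        (fun (st : List Int × Int) k =>
          let d : Int := if PySem.List.pyGetD ones ((m : Int) - k) false
              = PySem.List.pyGetD ones (m : Int) false then 1 else -1
          let v : Int := PySem.List.pyGetD st.1 (k - 1) 0 + d
          (PySem.List.pySetD st.1 (k - 1) v,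
           st.2 + v * v - PySem.List.pyGetD st.1 (k - 1) 0 * PySem.List.pyGetD st.1 (k - 1) 0))
        ((c ++ [0]), energy) (PySem.List.pyRange 1 ((m : Int) + 1) 1) with hR
      have hres := ih (m + 1) R.1 R.2
        (by omega) (by omega) (by omega) (by simpa using hr1)
        hr2 (by simpa using hr3)
      have hcast : ((m : Int) + 1) = (((m + 1 : Nat)) : Int) := by push_cast; ring
      rw [hcast]
      exact hres

-- ===== VERDICT (by name: the statement is the Claim_ definition above) =====
theorem energy_function_spec : Claim_equal_energy_function := by
  intro bitstring _
  unfold Spec_energy_function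
  simp only [energy_function, energy_function_alt]
  set ones : List Bool := bitstring.toList.map (fun ch => ch = '1') with hones
  set s : List Int := bitstring.toList.map (fun bit => if bit = '1' then 1 else -1) with hs
  have hmap : s = ones.map (fun b => if b then (1 : Int) else -1) := by
    rw [hs, hones, List.map_map]
    exact List.map_congr_left (fun ch _ => by by_cases h : ch = '1' <;> simp [h])
  have hlen : s.length = ones.length := by rw [hmap, List.length_map]
  rw [pv_A s]
  have := pv_outerB s ones hmap ones.length 1 [] 0 (by omega) (by omega) (by omega)
    (by simp)
    (fun t => by simp [pvCorrU])
    (by simp)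
  simp only [Nat.cast_one] at this
  rw [this, hlen]
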